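-- pv_equiv track=rewrite | github.com/mattdepillis/python-dsa | ae_questions/arrays/medium/best_seats/solution.py | best_seats
-- ===== SOURCE A (Python) =====
-- def best_seats(array):
--   last_taken = most_consecutive = 0
--   best_seat = None
--
--   for i in range(last_taken, len(array)):
--     if array[i] != 0:
--       if array[i - 1] == 0 and i - last_taken > most_consecutive:
--         most_consecutive = i - last_taken
--         best_seat = last_taken + (i - last_taken) // 2
--       last_taken = i
--
--   return -1 if best_seat is None else best_seat
-- ===== SOURCE B (Python) =====
-- def best_seats(array):
--     takens = [0] + [i for i, v in enumerate(array) if v != 0]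
--     best, most = -1, 0
--     for prev, cur in zip(takens, takens[1:]):
--         if array[cur - 1] == 0 and cur - prev > most:
--             most = cur - prev
--             best = prev + (cur - prev) // 2
--     return best
-- ===== Notes on version B (the rewrite author's own statement) =====
-- stated objective: alternative
-- what changed: B replaces A's single index loop carrying a last_taken/best_seat state machine by a two-pass decomposition: it first builds the list of taken-seat indices (with the sentinel 0 prepended) and then folds over consecutive pairs of that list.
import Mathlib
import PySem

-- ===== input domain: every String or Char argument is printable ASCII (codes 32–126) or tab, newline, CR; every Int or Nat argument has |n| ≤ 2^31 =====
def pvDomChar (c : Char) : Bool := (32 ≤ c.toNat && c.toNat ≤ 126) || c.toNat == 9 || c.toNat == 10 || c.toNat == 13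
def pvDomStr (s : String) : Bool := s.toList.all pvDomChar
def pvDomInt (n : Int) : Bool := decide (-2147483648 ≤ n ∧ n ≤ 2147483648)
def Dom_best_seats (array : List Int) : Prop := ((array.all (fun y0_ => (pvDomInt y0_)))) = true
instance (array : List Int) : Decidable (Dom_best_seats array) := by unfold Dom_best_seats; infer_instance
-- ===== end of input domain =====

-- B replaces A's one-pass last_taken/best_seat state machine by a two-pass decomposition
-- (collect taken indices with sentinel 0, then fold over consecutive pairs); objective: alternative, same O(n) cost.

-- ===== PORT A =====
-- loop body of A's for-loop; indices i and i-1 are always in range for the executed iterations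
-- (i ∈ [0, len), and i-1 = -1 only when the list is nonempty), so Python never raises and pyGetD is exact.
def bestA_step (array : List Int) (s : Int × Int × Option Int) (i : Int) : Int × Int × Option Int :=
  if PySem.List.pyGetD array i 0 ≠ 0 then
    if PySem.List.pyGetD array (i - 1) 0 = 0 ∧ i - s.1 > s.2.1 then
      (i, i - s.1, some (s.1 + PySem.Int.floordiv (i - s.1) 2))
    else (i, s.2.1, s.2.2)
  else s

def best_seats (array : List Int) : Int :=
  let s := (PySem.List.pyRange 0 (array.length : Int) 1).foldl (bestA_step array) (0, 0, none)
  match s.2.2 with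
  | none => -1
  | some v => v

-- ===== PORT B =====
-- loop body of B's for-loop over consecutive pairs (prev, cur) of the taken-index list.
def bestB_step (array : List Int) (s : Int × Int) (pc : Int × Int) : Int × Int :=
  if PySem.List.pyGetD array (pc.2 - 1) 0 = 0 ∧ pc.2 - pc.1 > s.2 then
    (pc.1 + PySem.Int.floordiv (pc.2 - pc.1) 2, pc.2 - pc.1)
  else s

def best_seats_alt (array : List Int) : Int :=
  let takens : List Int :=
    0 :: ((PySem.List.enumerate array).filter (fun p => decide (p.2 ≠ 0))).map (fun p => p.1)
  ((takens.zip (takens.drop 1)).foldl (bestB_step array) (-1, 0)).1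

-- ===== PRECONDITION & SPEC =====
def Spec_best_seats (array : List Int) (out : Int) : Prop := out = best_seats_alt array
instance (array : List Int) (out : Int) : Decidable (Spec_best_seats array out) := by unfold Spec_best_seats; infer_instance

-- ===== CLAIM (what is proved, stated in full; the proofs are below) =====
def Claim_equal_best_seats : Prop := ∀ (array : List Int), Dom_best_seats array → Spec_best_seats array (best_seats array)

-- ===== LEMMAS AND PROOFS =====

-- the inner (seat-taken) branch of A's loop body
def bestA_inner (array : List Int) (s : Int × Int × Option Int) (i : Int) : Int × Int × Option Int :=
  if PySem.List.pyGetD array (i - 1) 0 = 0 ∧ i - s.1 > s.2.1 then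
    (i, i - s.1, some (s.1 + PySem.Int.floordiv (i - s.1) 2))
  else (i, s.2.1, s.2.2)

def optv : Option Int → Int
  | none => -1
  | some v => v

lemma stepA_eq_ite (array : List Int) :
    bestA_step array = fun s i =>
      if decide (PySem.List.pyGetD array i 0 ≠ 0) then bestA_inner array s i else s := by
  funext s i
  by_cases h : PySem.List.pyGetD array i 0 ≠ 0 <;>
    simp [bestA_step, bestA_inner, h]

-- A's fold over the whole range equals the inner-branch fold over just the taken indices
lemma foldA_filter (array : List Int) (init : Int × Int × Option Int) :
    (PySem.List.pyRange 0 (array.length : Int) 1).foldl (bestA_step array) init =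
      ((PySem.List.pyRange 0 (array.length : Int) 1).filter
        (fun i => decide (PySem.List.pyGetD array i 0 ≠ 0))).foldl (bestA_inner array) init := by
  rw [List.foldl_filter, stepA_eq_ite]

-- the taken-index list built from enumerate is the filtered index range (suffix-generalised)
lemma takens_eq_aux (array : List Int) :
    ∀ (suf : List Int) (k : Nat), array.drop k = suf →
      ((PySem.List.enumerate suf (k : Int)).filter (fun p => decide (p.2 ≠ 0))).map (fun p => p.1) =
        (PySem.List.pyRange (k : Int) (array.length : Int) 1).filter
          (fun i => decide (PySem.List.pyGetD array i 0 ≠ 0)) := by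
  intro suf
  induction suf with
  | nil =>
    intro k hk
    have hlen : array.length ≤ k := by
      by_contra h
      have := List.drop_eq_nil_iff.mp hk
      omega
    rw [PySem.List.pyRange_one_eq_nil (by exact_mod_cast hlen)]
    simp [PySem.List.enumerate]
  | cons x xs ih =>
    intro k hk
    have hklen : k < array.length := by
      by_contra h
      have : array.drop k = [] := List.drop_eq_nil_iff.mpr (by omega)
      simp [this] at hk
    have hdrop : array.drop (k + 1) = xs := by
      have h1 := congrArg (List.drop 1) hk
      simpa [List.drop_drop, Nat.add_comm] using h1
    have hx : array[k] = x := by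
      have h0 : (array.drop k)[0]? = array[k]? := by simp [List.getElem?_drop]
      rw [hk] at h0
      simp [List.getElem?_eq_getElem hklen] at h0
      exact h0.symm
    have hget : PySem.List.pyGetD array ((k : Int)) 0 = x := by
      rw [PySem.List.pyGetD_natCast]
      simp [List.getD_eq_getElem?_getD, List.getElem?_eq_getElem hklen, hx]
    have ih' := ih (k + 1) hdrop
    push_cast at ih'
    rw [PySem.List.enumerate_cons, PySem.List.pyRange_one_cons (by exact_mod_cast hklen)]
    by_cases hx0 : x = 0
    · simp [hx0, hget]
      simpa using ih'
    · simp [hx0, hget]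
      simpa using ih'

-- A's inner branch always sets last_taken to the current index; B's fold over consecutive
-- pairs of (lt :: ts) tracks exactly (best, most) of A's state
lemma core (array : List Int) :
    ∀ (ts : List Int) (lt mc : Int) (bs : Option Int),
      ((lt :: ts).zip ts).foldl (bestB_step array) (optv bs, mc) =
        (optv (ts.foldl (bestA_inner array) (lt, mc, bs)).2.2,
         (ts.foldl (bestA_inner array) (lt, mc, bs)).2.1) := by
  intro ts
  induction ts with
  | nil => intro lt mc bs; simp
  | cons t ts' ih =>
    intro lt mc bs
    simp only [List.zip_cons_cons, List.foldl_cons]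
    by_cases h : PySem.List.pyGetD array (t - 1) 0 = 0 ∧ t - lt > mc
    · have ih' := ih t (t - lt) (some (lt + PySem.Int.floordiv (t - lt) 2))
      simp only [optv] at ih'
      simpa [bestB_step, bestA_inner, h] using ih'
    · have ih' := ih t mc bs
      simpa [bestB_step, bestA_inner, h] using ih'

lemma match_eq_optv (s : Option Int) :
    (match s with | none => (-1 : Int) | some v => v) = optv s := by
  cases s <;> rfl

theorem best_seats_spec : Claim_equal_best_seats := by
  intro array _
  unfold Spec_best_seats best_seats best_seats_alt
  rw [foldA_filter]
  have htk := takens_eq_aux array array 0 (by simp)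
  simp only [Nat.cast_zero] at htk
  have hc := core array
    ((PySem.List.pyRange 0 (array.length : Int) 1).filter
      (fun i => decide (PySem.List.pyGetD array i 0 ≠ 0))) 0 0 none
  simp only [optv] at hc
  simp only [List.drop_one, List.tail_cons, htk, hc, match_eq_optv]
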